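-- pv_equiv track=rewrite | github.com/srinidhisrinivas/wordle-solver | solver.py | process_evaluation
-- ===== SOURCE A (Python) =====
-- def process_evaluation(guess, evaluation):
-- 	guess_split = [char for char in guess];
-- 	evaluation_split = [char for char in evaluation];
--
-- 	rule_list = [];
-- 	for idx, eval_ in enumerate(evaluation_split):
-- 		if eval_ == 'Y':
-- 			rule_list.append((guess_split[idx], True, idx))
-- 		elif eval_ == 'O':
-- 			rule_list.append((guess_split[idx], False, idx))
-- 		else:
-- 			char = guess_split[idx];
-- 			all_char_ids = []
-- 			for idx2, comp_char in enumerate(guess_split):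
-- 				if char == comp_char:
-- 					all_char_ids.append(idx2);
--
-- 			is_same_char = [(evaluation_split[idx2] in ['Y', 'O']) for idx2 in all_char_ids];
-- 			if any(is_same_char):
-- 				rule_list.append((guess_split[idx], False, idx));
-- 			else:
-- 				rule_list.append((guess_split[idx], False, -1));
--
-- 	return rule_list;
-- ===== SOURCE B (Python) =====
-- def process_evaluation(guess, evaluation):
--     good = {guess[i] for i, e in enumerate(evaluation) if e in ('Y', 'O')}
--     rules = []
--     for i, e in enumerate(evaluation):
--         c = guess[i]
--         if e == 'Y':
--             rules.append((c, True, i))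
--         elif e == 'O':
--             rules.append((c, False, i))
--         else:
--             rules.append((c, False, i if c in good else -1))
--     return rules
-- ===== Notes on version B (the rewrite author's own statement) =====
-- stated objective: faster
-- what changed: B precomputes one set of 'good' letters (letters with a Y/O evaluation) and does a single forward pass, instead of A's inner rescans of the whole guess for every non-Y/O position.
import Mathlib
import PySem

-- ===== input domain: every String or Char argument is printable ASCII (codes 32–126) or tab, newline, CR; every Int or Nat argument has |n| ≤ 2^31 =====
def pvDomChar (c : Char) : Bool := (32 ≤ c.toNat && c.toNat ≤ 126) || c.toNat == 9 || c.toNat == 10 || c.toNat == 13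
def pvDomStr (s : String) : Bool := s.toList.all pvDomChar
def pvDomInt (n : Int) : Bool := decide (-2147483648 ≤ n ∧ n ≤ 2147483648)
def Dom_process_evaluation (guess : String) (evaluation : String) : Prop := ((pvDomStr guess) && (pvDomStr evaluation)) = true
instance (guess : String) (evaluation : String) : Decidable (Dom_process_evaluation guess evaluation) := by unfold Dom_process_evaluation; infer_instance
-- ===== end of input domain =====

-- B replaces A's per-position inner rescan of the guess by one precomputed set of Y/O-evaluated letters and a single forward pass: O(n) instead of O(n^2), measurably faster.

-- ===== PORT A =====
def process_evaluation (guess : String) (evaluation : String) : List (String × Bool × Int) :=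
  let guess_split := guess.toList
  let evaluation_split := evaluation.toList
  (PySem.List.enumerate evaluation_split).foldl (fun rule_list p =>
    if p.2 = 'Y' then
      rule_list ++ [(String.ofList [PySem.List.pyGetD guess_split p.1 ' '], true, p.1)]
    else if p.2 = 'O' then
      rule_list ++ [(String.ofList [PySem.List.pyGetD guess_split p.1 ' '], false, p.1)]
    else
      let char := PySem.List.pyGetD guess_split p.1 ' '
      let all_char_ids := (PySem.List.enumerate guess_split).foldl
        (fun acc q => if char = q.2 then acc ++ [q.1] else acc) []
      let is_same_char := all_char_ids.map
        (fun idx2 => decide (PySem.List.pyGetD evaluation_split idx2 ' ' ∈ (['Y', 'O'] : List Char)))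
      if is_same_char.any id then
        rule_list ++ [(String.ofList [char], false, p.1)]
      else
        rule_list ++ [(String.ofList [char], false, -1)]) []

-- ===== PORT B =====
def process_evaluation_alt (guess : String) (evaluation : String) : List (String × Bool × Int) :=
  let g := guess.toList
  let e := evaluation.toList
  let good : PySem.Set Char := PySem.Set.ofList ((PySem.List.enumerate e).filterMap
    (fun p => if p.2 = 'Y' ∨ p.2 = 'O' then some (PySem.List.pyGetD g p.1 ' ') else none))
  (PySem.List.enumerate e).foldl (fun rules p =>
    let c := PySem.List.pyGetD g p.1 ' '
    if p.2 = 'Y' then rules ++ [(String.ofList [c], true, p.1)]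
    else if p.2 = 'O' then rules ++ [(String.ofList [c], false, p.1)]
    else rules ++ [(String.ofList [c], false, if good.contains c then p.1 else -1)]) []

-- ===== PRECONDITION & SPEC =====
-- Pre_ is exactly the set of inputs on which Python A returns: evaluation no longer than guess,
-- and no letter at a non-Y/O evaluated position recurs in guess beyond the evaluation's length
-- (otherwise A's inner rescan indexes evaluation out of range and raises IndexError).
def Pre_process_evaluation (guess : String) (evaluation : String) : Prop :=
  evaluation.toList.length ≤ guess.toList.length ∧
  ∀ i : Nat, i < evaluation.toList.length →
    evaluation.toList.getD i ' ' = 'Y' ∨ evaluation.toList.getD i ' ' = 'O' ∨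
    guess.toList.getD i ' ' ∉ guess.toList.drop evaluation.toList.length
instance (guess : String) (evaluation : String) : Decidable (Pre_process_evaluation guess evaluation) := by
  unfold Pre_process_evaluation; infer_instance
def pvWitness_process_evaluation : String × String := ("crane", "YOXXX")

def Spec_process_evaluation (guess : String) (evaluation : String) (out : List (String × Bool × Int)) : Prop := out = process_evaluation_alt guess evaluation
instance (guess : String) (evaluation : String) (out : List (String × Bool × Int)) : Decidable (Spec_process_evaluation guess evaluation out) := by unfold Spec_process_evaluation; infer_instance

-- ===== CLAIM (what is proved, stated in full; the proofs are below) =====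
def Claim_equal_process_evaluation : Prop := ∀ (guess : String) (evaluation : String), Dom_process_evaluation guess evaluation → Pre_process_evaluation guess evaluation → Spec_process_evaluation guess evaluation (process_evaluation guess evaluation)

-- ===== LEMMAS AND PROOFS =====

-- A's inner loop building all_char_ids, as filter-then-map.
lemma foldl_ids_eq (c : Char) (l : List (Int × Char)) (acc : List Int) :
    l.foldl (fun acc q => if c = q.2 then acc ++ [q.1] else acc) acc
      = acc ++ (l.filter (fun q => decide (c = q.2))).map (fun q => q.1) := by
  induction l generalizing acc with
  | nil => simp
  | cons hd tl ih =>
    by_cases h : c = hd.2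
    · subst h; simp [ih]
    · simp [h, ih]

-- Core: A's "any Y/O occurrence of this letter anywhere in the guess" test equals
-- B's membership test in the precomputed set, given len e ≤ len g.
lemma any_eq_contains (g e : List Char) (hle : e.length ≤ g.length) (c : Char) :
    (((PySem.List.enumerate g).foldl
        (fun acc q => if c = q.2 then acc ++ [q.1] else acc) []).map
      (fun idx2 => decide (PySem.List.pyGetD e idx2 ' ' ∈ (['Y', 'O'] : List Char)))).any id
    = PySem.Set.contains (PySem.Set.ofList ((PySem.List.enumerate e).filterMap
        (fun p => if p.2 = 'Y' ∨ p.2 = 'O' then some (PySem.List.pyGetD g p.1 ' ') else none))) c := by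
  rw [foldl_ids_eq]
  apply Bool.eq_iff_iff.mpr
  rw [PySem.Set.contains_iff, PySem.Set.mem_ofList, List.mem_filterMap]
  simp only [List.nil_append, List.any_map, List.any_eq_true, List.mem_filter,
    Function.comp, decide_eq_true_eq]
  constructor
  · rintro ⟨q, ⟨hqmem, hc⟩, hmem⟩
    obtain ⟨k, hkg, rfl⟩ := (PySem.List.mem_enumerate_iff _ _ _).mp hqmem
    simp only [PySem.List.pyGetD_natCast, zero_add] at hmem
    have hke : k < e.length := by
      by_contra hx
      rw [List.getD_eq_default _ _ (by omega)] at hmem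
      simp at hmem
    refine ⟨((0 : Int) + (k : Nat), e[k]), (PySem.List.mem_enumerate_iff _ _ _).mpr ⟨k, hke, rfl⟩, ?_⟩
    rw [List.getD_eq_getElem _ _ hke] at hmem
    have hyo : e[k] = 'Y' ∨ e[k] = 'O' := by simpa using hmem
    rw [if_pos hyo]
    simp [hc, List.getElem?_eq_getElem hkg]
  · rintro ⟨p, hpmem, hp⟩
    obtain ⟨k, hk, rfl⟩ := (PySem.List.mem_enumerate_iff _ _ _).mp hpmem
    split at hp
    · rename_i hyo
      have hkg : k < g.length := lt_of_lt_of_le hk hle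
      simp only [Option.some.injEq, PySem.List.pyGetD_natCast, zero_add,
        List.getD_eq_getElem _ _ hkg] at hp
      refine ⟨((0 : Int) + (k : Nat), g[k]), ⟨(PySem.List.mem_enumerate_iff _ _ _).mpr ⟨k, hkg, rfl⟩, by simp [hp]⟩, ?_⟩
      simp only [PySem.List.pyGetD_natCast, zero_add, List.getD_eq_getElem _ _ hk]
      simpa using hyo
    · exact absurd hp (by simp)

-- ===== VERDICT (by name: the statement is the Claim_ definition above) =====
theorem process_evaluation_spec : Claim_equal_process_evaluation := by
  intro guess evaluation _ hpre
  unfold Spec_process_evaluation process_evaluation process_evaluation_alt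
  obtain ⟨hle, _⟩ := hpre
  apply PySem.List.foldl_congr_mem'
  intro p hp acc
  obtain ⟨k, hk, rfl⟩ := (PySem.List.mem_enumerate_iff _ _ _).mp hp
  by_cases hY : evaluation.toList[k] = 'Y'
  · simp [hY]
  · by_cases hO : evaluation.toList[k] = 'O'
    · simp [hO]
    · simp only [hY, hO, if_false]
      rw [any_eq_contains guess.toList evaluation.toList hle]
      split <;> rename_i h <;> simp only [h, if_true, if_false]
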